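-- pv_equiv track=rewrite | github.com/mbc96325/Epidemic-spreading-model-on-public-transit | B08_plot_theory_sim_compare.py | generate_x_label
-- ===== SOURCE A (Python) =====
-- def generate_x_label(total_sim_period):
--     day_list = ['Mon','Tue','Wed','Thu','Fri','Sat','Sun']
--     Mon_start_time_int = 12
--     div = total_sim_period // 7*24
--     mod = total_sim_period % 7*24
--     if mod>0:
--         div += 1
--     x_ticks = []
--     new_ticks = []
--     xvline_x = [1]
--     for period in range(div):
--         count = 0
--         for key in day_list:
--             x_ticks_value = Mon_start_time_int + count*24 + 7*24*period
--             if x_ticks_value <= total_sim_period: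
--                 x_ticks.append(x_ticks_value)
--                 xvline_x.append(x_ticks_value + 12)
--                 new_ticks.append(key)
--                 count += 1
--             else:
--                 break
--     return x_ticks, new_ticks, xvline_x
-- ===== SOURCE B (Python) =====
-- def generate_x_label(total_sim_period):
--     day_list = ['Mon', 'Tue', 'Wed', 'Thu', 'Fri', 'Sat', 'Sun']
--     x_ticks = []
--     new_ticks = []
--     xvline_x = [1]
--     j = 0
--     t = 12
--     while t <= total_sim_period:
--         x_ticks.append(t)
--         xvline_x.append(t + 12)
--         new_ticks.append(day_list[j % 7])
--         j += 1
--         t = 12 + 24 * j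
--     return x_ticks, new_ticks, xvline_x
-- ===== Notes on version B (the rewrite author's own statement) =====
-- stated objective: faster
-- what changed: Replaces A's nested week/day loops, whose outer bound is hugely over-provisioned (almost every period does one failed comparison and breaks), by a single linear while-loop over tick indices that cycles the day labels modulo the week length.
import Mathlib
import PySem

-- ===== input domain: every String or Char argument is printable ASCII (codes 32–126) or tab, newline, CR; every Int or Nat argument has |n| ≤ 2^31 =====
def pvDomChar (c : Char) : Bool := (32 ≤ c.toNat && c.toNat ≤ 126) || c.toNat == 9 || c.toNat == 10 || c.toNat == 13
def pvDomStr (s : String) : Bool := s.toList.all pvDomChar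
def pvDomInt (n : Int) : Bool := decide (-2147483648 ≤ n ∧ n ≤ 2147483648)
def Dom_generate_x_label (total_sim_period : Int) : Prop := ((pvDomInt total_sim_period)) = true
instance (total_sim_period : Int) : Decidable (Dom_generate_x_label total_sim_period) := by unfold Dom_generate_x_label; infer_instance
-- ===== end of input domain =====

-- B replaces A's nested week/day loops (with a hugely over-provisioned outer bound) by one
-- linear while-loop over tick indices; same return value, measurably faster (constant factor).

-- ===== PORT A =====
def pvDayList : List String := ["Mon", "Tue", "Wed", "Thu", "Fri", "Sat", "Sun"]

-- inner 'for key in day_list: … else break' loop of A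
def pvInnerA (total period : Int) (count : Int)
    (acc : List Int × List String × List Int) : List String → List Int × List String × List Int
  | [] => acc
  | key :: rest =>
    let v := 12 + count * 24 + 7 * 24 * period
    if v ≤ total then
      pvInnerA total period (count + 1) (acc.1 ++ [v], acc.2.1 ++ [key], acc.2.2 ++ [v + 12]) rest
    else acc

def generate_x_label (total_sim_period : Int) : List Int × List String × List Int :=
  let div0 := PySem.Int.floordiv total_sim_period 7 * 24
  let md := PySem.Int.mod total_sim_period 7 * 24
  let dv := if md > 0 then div0 + 1 else div0
  (PySem.List.pyRange 0 dv 1).foldl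
    (fun acc period => pvInnerA total_sim_period period 0 acc pvDayList) ([], [], [1])

-- ===== PORT B =====
-- the 'while t <= total' loop of B (t = 12 + 24*j is recomputed from j each iteration, as in Source B)
def pvBLoop (total j : Int) (x_ticks : List Int) (new_ticks : List String) (xvline_x : List Int) :
    List Int × List String × List Int :=
  let t := 12 + 24 * j
  if _h : t ≤ total then
    pvBLoop total (j + 1) (x_ticks ++ [t])
      (new_ticks ++ [PySem.List.pyGetD pvDayList (PySem.Int.mod j 7) ""]) (xvline_x ++ [t + 12])
  else (x_ticks, new_ticks, xvline_x)
termination_by (total + 1 - (12 + 24 * j)).toNat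
decreasing_by omega

def generate_x_label_alt (total_sim_period : Int) : List Int × List String × List Int :=
  pvBLoop total_sim_period 0 [] [] [1]

-- ===== PRECONDITION & SPEC =====
def Spec_generate_x_label (total_sim_period : Int) (out : List Int × List String × List Int) : Prop := out = generate_x_label_alt total_sim_period
instance (total_sim_period : Int) (out : List Int × List String × List Int) : Decidable (Spec_generate_x_label total_sim_period out) := by unfold Spec_generate_x_label; infer_instance

-- ===== CLAIM (what is proved, stated in full; the proofs are below) =====
def Claim_equal_generate_x_label : Prop := ∀ (total_sim_period : Int), Dom_generate_x_label total_sim_period → Spec_generate_x_label total_sim_period (generate_x_label total_sim_period)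

-- ===== LEMMAS AND PROOFS =====

-- the k-th tick / vline / label as a function of the flat tick index
def pvTickF (i : Nat) : Int := 12 + 24 * i
def pvLabelF (i : Nat) : String := pvDayList.getD (i % 7) ""
def pvVlineF (i : Nat) : Int := 24 + 24 * i

-- segment of n consecutive values of f starting at index j
def pvSeg {α : Type} (f : Nat → α) (j n : Nat) : List α := (List.range n).map (fun k => f (j + k))

-- total number of ticks: #{ j : Nat | 12 + 24*j ≤ total }
def pvM (total : Int) : Nat := (PySem.Int.floordiv (total + 12) 24).toNat

-- state of the accumulators after n ticks have been emitted
def pvAcc (n : Nat) : List Int × List String × List Int :=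
  (pvSeg pvTickF 0 n, pvSeg pvLabelF 0 n, (1 : Int) :: pvSeg pvVlineF 0 n)

lemma pvM_iff (total : Int) (j : Nat) : (12 + 24 * (j : Int) ≤ total) ↔ j < pvM total := by
  unfold pvM
  rw [PySem.Int.floordiv_eq_ediv_of_pos (by omega : (0:Int) < 24)]
  omega

lemma pvSeg_zero {α : Type} (f : Nat → α) (j : Nat) : pvSeg f j 0 = [] := rfl

lemma pvSeg_append {α : Type} (f : Nat → α) (j a b : Nat) :
    pvSeg f j a ++ pvSeg f (j + a) b = pvSeg f j (a + b) := by
  unfold pvSeg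
  rw [List.range_add, List.map_append, List.map_map]
  congr 1
  exact List.map_congr_left fun k _ => by simp [Function.comp]; congr 1; omega

lemma pvSeg_succ {α : Type} (f : Nat → α) (j n : Nat) :
    pvSeg f j (n + 1) = f j :: pvSeg f (j + 1) n := by
  have h := pvSeg_append f j 1 n
  rw [Nat.add_comm n 1, ← h]
  simp [pvSeg]

-- characterization of B's loop
lemma pvBLoop_eq (total : Int) (j : Nat) (xs : List Int) (ls : List String) (vs : List Int) :
    pvBLoop total (j : Int) xs ls vs =
      (xs ++ pvSeg pvTickF j (pvM total - j), ls ++ pvSeg pvLabelF j (pvM total - j),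
       vs ++ pvSeg pvVlineF j (pvM total - j)) := by
  generalize hn : pvM total - j = n
  induction n generalizing j xs ls vs with
  | zero =>
    rw [pvBLoop]
    have : ¬ (12 + 24 * (j : Int) ≤ total) := fun h => by
      have := (pvM_iff total j).mp h; omega
    simp [this, pvSeg_zero]
  | succ n ih =>
    have hj : j < pvM total := by omega
    have ht : 12 + 24 * (j : Int) ≤ total := (pvM_iff total j).mpr hj
    rw [pvBLoop]
    simp only [ht, dif_pos]
    have hcast : (j : Int) + 1 = ((j + 1 : Nat) : Int) := by push_cast; ring
    rw [hcast, ih (j + 1) _ _ _ (by omega)]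
    have hmod : PySem.Int.mod (j : Int) 7 = ((j % 7 : Nat) : Int) := by
      exact_mod_cast PySem.Int.mod_natCast j 7
    have hlbl : PySem.List.pyGetD pvDayList (PySem.Int.mod (j : Int) 7) "" = pvLabelF j := by
      rw [hmod, PySem.List.pyGetD_natCast]; rfl
    rw [hlbl, pvSeg_succ pvTickF j n, pvSeg_succ pvLabelF j n, pvSeg_succ pvVlineF j n]
    simp [pvTickF, pvLabelF, pvVlineF]
    omega

-- characterization of A's inner loop, started at day position c of the week, period p
lemma pvInnerA_eq (total : Int) (p c : Nat) (hc : c ≤ 7) (xs : List Int) (ls : List String)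
    (vs : List Int) :
    pvInnerA total (p : Int) (c : Int) (xs, ls, vs) (pvDayList.drop c) =
      (xs ++ pvSeg pvTickF (7 * p + c) (min (7 - c) (pvM total - (7 * p + c))),
       ls ++ pvSeg pvLabelF (7 * p + c) (min (7 - c) (pvM total - (7 * p + c))),
       vs ++ pvSeg pvVlineF (7 * p + c) (min (7 - c) (pvM total - (7 * p + c)))) := by
  generalize hn : 7 - c = n
  induction n generalizing c xs ls vs with
  | zero =>
    have : c = 7 := by omega
    subst this
    simp [pvInnerA, pvDayList, pvSeg_zero]
  | succ n ih =>
    have hc7 : c < 7 := by omega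
    have hdrop : pvDayList.drop c = pvDayList[c] :: pvDayList.drop (c + 1) := by
      exact List.drop_eq_getElem_cons (by simp [pvDayList]; omega)
    rw [hdrop]
    simp only [pvInnerA]
    by_cases hle : 12 + (c : Int) * 24 + 7 * 24 * (p : Int) ≤ total
    · have hv : (12 + (c : Int) * 24 + 7 * 24 * (p : Int)) = 12 + 24 * ((7 * p + c : Nat) : Int) := by
        push_cast; ring
      have hlt : 7 * p + c < pvM total := (pvM_iff total (7 * p + c)).mp (by rw [← hv]; exact hle)
      simp only [hle, if_pos]
      have hcast : (c : Int) + 1 = ((c + 1 : Nat) : Int) := by push_cast; ring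
      rw [hcast, ih (c + 1) (by omega) _ _ _ (by omega)]
      have hm : min (n + 1) (pvM total - (7 * p + c)) =
          (min n (pvM total - (7 * p + (c + 1)))) + 1 := by omega
      rw [hm, pvSeg_succ pvTickF, pvSeg_succ pvLabelF, pvSeg_succ pvVlineF]
      have hkey : pvDayList[c] = pvLabelF (7 * p + c) := by
        unfold pvLabelF
        have h7 : (7 * p + c) % 7 = c := by omega
        rw [h7, List.getD_eq_getElem pvDayList "" (by simp [pvDayList]; omega)]
        rfl
      simp [pvTickF, pvVlineF, hkey, Nat.add_assoc]
      and_intros <;> omega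
    · have hge : pvM total ≤ 7 * p + c := by
        by_contra hlt
        exact hle (by
          have := (pvM_iff total (7 * p + c)).mpr (by omega)
          push_cast at this ⊢; omega)
      have hm : min (n + 1) (pvM total - (7 * p + c)) = 0 := by omega
      rw [if_neg hle, hm]
      simp [pvSeg_zero]

-- characterization of A's outer loop
lemma pvFold_eq (total dv : Int) (p : Nat) (hle : (p : Int) ≤ dv)
    (hfull : pvM total ≤ 7 * dv.toNat) :
    (PySem.List.pyRange (p : Int) dv 1).foldl
        (fun acc period => pvInnerA total period 0 acc pvDayList)
        (pvAcc (min (pvM total) (7 * p))) = pvAcc (pvM total) := by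
  generalize hn : (dv - (p : Int)).toNat = n
  induction n generalizing p with
  | zero =>
    rw [PySem.List.pyRange_one_eq_nil (by omega)]
    have : min (pvM total) (7 * p) = pvM total := by omega
    rw [this]
    rfl
  | succ n ih =>
    have hpd : (p : Int) < dv := by omega
    rw [PySem.List.pyRange_one_cons hpd, List.foldl_cons]
    have hdrop : pvDayList = pvDayList.drop 0 := rfl
    have hstep : pvInnerA total (p : Int) 0 (pvAcc (min (pvM total) (7 * p))) pvDayList =
        pvAcc (min (pvM total) (7 * (p + 1))) := by
      have hinner := pvInnerA_eq total p 0 (by omega)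
          (pvSeg pvTickF 0 (min (pvM total) (7 * p))) (pvSeg pvLabelF 0 (min (pvM total) (7 * p)))
          ((1 : Int) :: pvSeg pvVlineF 0 (min (pvM total) (7 * p)))
      simp only [Nat.cast_zero, Nat.add_zero, List.drop_zero] at hinner
      rw [pvAcc, hinner]
      by_cases hcase : 7 * p ≤ pvM total
      · have hmin1 : min (pvM total) (7 * p) = 7 * p := by omega
        have hmm : min (7 - 0) (pvM total - 7 * p) = min (pvM total) (7 * (p + 1)) - 7 * p := by
          omega
        rw [hmin1, hmm]
        unfold pvAcc
        have h1 := pvSeg_append pvTickF 0 (7 * p) (min (pvM total) (7 * (p + 1)) - 7 * p)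
        have h2 := pvSeg_append pvLabelF 0 (7 * p) (min (pvM total) (7 * (p + 1)) - 7 * p)
        have h3 := pvSeg_append pvVlineF 0 (7 * p) (min (pvM total) (7 * (p + 1)) - 7 * p)
        simp only [Nat.zero_add] at h1 h2 h3
        have hsum : 7 * p + (min (pvM total) (7 * (p + 1)) - 7 * p) = min (pvM total) (7 * (p + 1)) := by
          omega
        rw [hsum] at h1 h2 h3
        rw [h1, h2, List.cons_append, h3]
      · have hmin1 : min (pvM total) (7 * p) = pvM total := by omega
        have hmm : min (7 - 0) (pvM total - 7 * p) = 0 := by omega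
        have hmin2 : min (pvM total) (7 * (p + 1)) = pvM total := by omega
        rw [hmin1, hmm, hmin2]
        simp [pvSeg_zero, pvAcc]
    rw [hstep]
    have hcast : (p : Int) + 1 = ((p + 1 : Nat) : Int) := by push_cast; ring
    rw [hcast]
    exact ih (p + 1) (by omega) (by omega)

lemma pvM_le_bound (total : Int) :
    pvM total ≤ 7 * (if PySem.Int.mod total 7 * 24 > 0 then PySem.Int.floordiv total 7 * 24 + 1
                     else PySem.Int.floordiv total 7 * 24).toNat := by
  unfold pvM
  rw [PySem.Int.floordiv_eq_ediv_of_pos (by omega : (0:Int) < 24),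
      PySem.Int.floordiv_eq_ediv_of_pos (by omega : (0:Int) < 7),
      PySem.Int.mod_eq_emod_of_pos (by omega : (0:Int) < 7)]
  split <;> omega

-- ===== VERDICT (by name: the statement is the Claim_ definition above) =====
theorem generate_x_label_spec : Claim_equal_generate_x_label := by
  intro total _
  unfold Spec_generate_x_label
  set dv : Int := if PySem.Int.mod total 7 * 24 > 0 then PySem.Int.floordiv total 7 * 24 + 1
                  else PySem.Int.floordiv total 7 * 24 with hdv
  have hA : generate_x_label total =
      (PySem.List.pyRange 0 dv 1).foldl
        (fun acc period => pvInnerA total period 0 acc pvDayList) ([], [], [1]) := rfl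
  have hB := pvBLoop_eq total 0 [] [] [1]
  simp only [Nat.cast_zero, Nat.sub_zero] at hB
  have hAcc0 : pvAcc 0 = (([] : List Int), ([] : List String), [(1 : Int)]) := rfl
  have hbound := pvM_le_bound total
  rw [← hdv] at hbound
  rw [hA, generate_x_label_alt, hB]
  by_cases hpos : (0 : Int) ≤ dv
  · have h := pvFold_eq total dv 0 (by omega) hbound
    simp only [Nat.cast_zero, Nat.mul_zero, Nat.min_zero, hAcc0] at h
    rw [h]
    simp [pvAcc]
  · have hM0 : pvM total = 0 := by omega
    rw [PySem.List.pyRange_one_eq_nil (by omega)]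
    simp [hM0, pvSeg_zero]
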